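-- pv_equiv track=rewrite | github.com/hazelybell/estimate-charm | unnaturalcode/testdata/launchpad/lib/lp/app/browser/stringformatter.py | _linkify_url_should_be_ignored
-- ===== SOURCE A (Python) =====
-- def _linkify_url_should_be_ignored(url):
--     """Don't linkify URIs consisting of just the protocol."""
--
--     protocol_bases = [
--         'about',
--         'gopher',
--         'http',
--         'https',
--         'sftp',
--         'news',
--         'ftp',
--         'mailto',
--         'irc',
--         'jabber',
--         'apt',
--         ]
--
--     for base in protocol_bases:
--         if url in ('%s' % base, '%s:' % base, '%s://' % base):
--             return True
--     return False
-- ===== SOURCE B (Python) =====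
-- _PROTOCOL_NAMES = frozenset((
--     'about', 'gopher', 'http', 'https', 'sftp', 'news',
--     'ftp', 'mailto', 'irc', 'jabber', 'apt'))
--
--
-- def _linkify_url_should_be_ignored(url):
--     """Don't linkify URIs consisting of just the protocol."""
--     # Parse off the (optional) protocol suffix, then look the bare name up.
--     if url.endswith('://'):
--         base = url[:-3]
--     elif url.endswith(':'):
--         base = url[:-1]
--     else:
--         base = url
--     return base in _PROTOCOL_NAMES
-- ===== Notes on version B (the rewrite author's own statement) =====
-- stated objective: alternative
-- what changed: Instead of generating base, base+':' and base+'://' for each of the 11 protocols and testing the url against every candidate, B parses the url once - stripping a trailing '://' or ':' suffix if present - and looks the remaining bare name up in a set of the 11 protocol names (parse-then-lookup vs generate-and-test).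
import Mathlib
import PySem

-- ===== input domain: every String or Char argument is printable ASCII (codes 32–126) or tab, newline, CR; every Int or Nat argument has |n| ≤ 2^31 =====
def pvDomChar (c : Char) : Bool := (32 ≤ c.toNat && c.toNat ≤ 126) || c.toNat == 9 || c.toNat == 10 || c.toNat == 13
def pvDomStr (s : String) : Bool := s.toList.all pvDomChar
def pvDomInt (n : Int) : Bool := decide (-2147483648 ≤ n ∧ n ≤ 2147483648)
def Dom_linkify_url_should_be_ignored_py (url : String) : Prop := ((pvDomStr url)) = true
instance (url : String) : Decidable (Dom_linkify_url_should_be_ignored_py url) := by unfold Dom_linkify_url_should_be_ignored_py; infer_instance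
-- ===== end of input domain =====

-- B parses the url (strip a trailing '://' or ':' once) and looks the bare name up in the 11-name set, instead of A's generate-and-test over all 33 candidate strings (alternative decomposition, same cost).


-- ===== PORT A =====
-- for-loop with early return over the protocol list; 'url in (b, b+':', b+'://')' = three-way equality
def pvLinkifyBases : List String :=
  ["about", "gopher", "http", "https", "sftp", "news", "ftp", "mailto", "irc", "jabber", "apt"]

def linkify_url_should_be_ignored_py (url : String) : Bool :=
  pvLinkifyBases.any (fun base =>
    url == base || url == base ++ ":" || url == base ++ "://")

-- ===== PORT B =====
-- the frozenset of the 11 bare protocol names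
def pvProtocolNames : PySem.Set String :=
  PySem.Set.ofList ["about", "gopher", "http", "https", "sftp", "news", "ftp", "mailto", "irc", "jabber", "apt"]

-- strip a trailing '://' or ':' (url[:-3] / url[:-1]), then one set lookup
def linkify_url_should_be_ignored_py_alt (url : String) : Bool :=
  let base :=
    if PySem.Str.endswith url "://" then PySem.Str.slice url none (some (-3))
    else if PySem.Str.endswith url ":" then PySem.Str.slice url none (some (-1))
    else url
  PySem.Set.contains pvProtocolNames base

-- ===== PRECONDITION & SPEC =====
def Spec_linkify_url_should_be_ignored_py (url : String) (out : Bool) : Prop := out = linkify_url_should_be_ignored_py_alt url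
instance (url : String) (out : Bool) : Decidable (Spec_linkify_url_should_be_ignored_py url out) := by unfold Spec_linkify_url_should_be_ignored_py; infer_instance

-- ===== CLAIM =====
def Claim_equal_linkify_url_should_be_ignored_py : Prop := ∀ (url : String), Dom_linkify_url_should_be_ignored_py url → Spec_linkify_url_should_be_ignored_py url (linkify_url_should_be_ignored_py url)

-- ===== LEMMAS AND PROOFS =====

def pvAll33 : List String :=
  ["about", "about:", "about://", "gopher", "gopher:", "gopher://",
   "http", "http:", "http://", "https", "https:", "https://",
   "sftp", "sftp:", "sftp://", "news", "news:", "news://",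
   "ftp", "ftp:", "ftp://", "mailto", "mailto:", "mailto://",
   "irc", "irc:", "irc://", "jabber", "jabber:", "jabber://",
   "apt", "apt:", "apt://"]

-- A accepts exactly the 33 literal strings base(+':',+'://')
theorem pvA_iff (url : String) : linkify_url_should_be_ignored_py url = true ↔ url ∈ pvAll33 := by
  have hA : linkify_url_should_be_ignored_py url =
      ((url == "about" || url == "about:" || url == "about://") || ((url == "gopher" || url == "gopher:" || url == "gopher://") || ((url == "http" || url == "http:" || url == "http://") || ((url == "https" || url == "https:" || url == "https://") || ((url == "sftp" || url == "sftp:" || url == "sftp://") || ((url == "news" || url == "news:" || url == "news://") || ((url == "ftp" || url == "ftp:" || url == "ftp://") || ((url == "mailto" || url == "mailto:" || url == "mailto://") || ((url == "irc" || url == "irc:" || url == "irc://") || ((url == "jabber" || url == "jabber:" || url == "jabber://") || ((url == "apt" || url == "apt:" || url == "apt://") || false))))))))))) := rfl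
  rw [hA]
  simp only [pvAll33, Bool.or_false, Bool.or_eq_true, beq_iff_eq,
    List.mem_cons, List.not_mem_nil, or_false, or_assoc]

theorem pvContains11 (s : String) : PySem.Set.contains pvProtocolNames s = true ↔
    s ∈ (["about", "gopher", "http", "https", "sftp", "news", "ftp", "mailto", "irc", "jabber", "apt"] : List String) := by
  have h : pvProtocolNames = ["about", "gopher", "http", "https", "sftp", "news", "ftp", "mailto", "irc", "jabber", "apt"] := by decide
  rw [h, PySem.Set.contains_iff]

theorem pvB_iff (url : String) : linkify_url_should_be_ignored_py_alt url = true ↔ url ∈ pvAll33 := by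
  unfold linkify_url_should_be_ignored_py_alt
  by_cases h3 : PySem.Str.endswith url "://" = true
  · rw [if_pos h3]
    rw [pvContains11]
    obtain ⟨t, ht⟩ := (PySem.Chars.endswith_iff url.toList "://".toList).mp
      (by rw [← PySem.Str.endswith_eq]; exact h3)
    have hsl : (PySem.Str.slice url none (some (-3))).toList = t := by
      rw [PySem.Str.toList_slice, PySem.Chars.slice_eq_listSlice,
        PySem.List.slice_to_neg_ofNat url.toList 3 (by omega), ← ht]
      simp
    have hurl : url.toList = t ++ "://".toList := ht.symm
    constructor
    · intro hm
      simp only [List.mem_cons, List.not_mem_nil, or_false] at hm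
      rcases hm with h|h|h|h|h|h|h|h|h|h|h <;>
        (rw [h] at hsl; rw [← hsl] at hurl;
         simp only [pvAll33, List.mem_cons, List.not_mem_nil, or_false, String.ext_iff];
         rw [hurl]; decide)
    · intro hm
      fin_cases hm <;> revert h3 <;> decide
  · by_cases h1 : PySem.Str.endswith url ":" = true
    · rw [if_neg h3, if_pos h1]
      rw [pvContains11]
      obtain ⟨t, ht⟩ := (PySem.Chars.endswith_iff url.toList ":".toList).mp
        (by rw [← PySem.Str.endswith_eq]; exact h1)
      have hsl : (PySem.Str.slice url none (some (-1))).toList = t := by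
        rw [PySem.Str.slice_to_neg_one, ← ht]
        simp
      have hurl : url.toList = t ++ ":".toList := ht.symm
      constructor
      · intro hm
        simp only [List.mem_cons, List.not_mem_nil, or_false] at hm
        rcases hm with h|h|h|h|h|h|h|h|h|h|h <;>
          (rw [h] at hsl; rw [← hsl] at hurl;
           simp only [pvAll33, List.mem_cons, List.not_mem_nil, or_false, String.ext_iff];
           rw [hurl]; decide)
      · intro hm
        fin_cases hm <;> revert h1 <;> decide
    · rw [if_neg h3, if_neg h1]
      rw [pvContains11]
      constructor
      · intro hm
        fin_cases hm <;> decide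
      · intro hm
        fin_cases hm <;> revert h1 h3 <;> decide

-- ===== VERDICT =====
theorem linkify_url_should_be_ignored_py_spec : Claim_equal_linkify_url_should_be_ignored_py := by
  intro url _
  unfold Spec_linkify_url_should_be_ignored_py
  exact Bool.eq_iff_iff.mpr ((pvA_iff url).trans (pvB_iff url).symm)
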